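-- pv_equiv track=rewrite | github.com/shrxya1810/ZerotoOne-Adobe-Final-Submission | Connect-the-Dots-clean-main/Connect-the-Dots-clean-main/server/pdf_extractor.py | _calculate_spacing_percentiles
-- ===== SOURCE A (Python) =====
-- from typing import List, Dict, Tuple, Optional
--
-- def _calculate_spacing_percentiles(all_lines_data: List[Dict]) -> Dict:
--     """Calculate spacing statistics for strict isolation testing"""
--
--     spacings = []
--
--     # Group lines by page for proper spacing calculation
--     pages = {}
--     for line in all_lines_data:
--         page = line.get('page', 0)
--         if page not in pages:
--             pages[page] = []
--         pages[page].append(line)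
--
--     # Calculate spacing between consecutive lines within each page
--     for page_lines in pages.values():
--         for i in range(len(page_lines) - 1):
--             current = page_lines[i]
--             next_line = page_lines[i + 1]
--
--             current_y = current.get('y_position', i * 14)
--             current_height = current.get('height', 14)
--             next_y = next_line.get('y_position', (i + 1) * 14)
--
--             spacing = abs(next_y - (current_y + current_height))
--             spacings.append(spacing)
--
--     if not spacings:
--         return {'p50': 5, 'p75': 10, 'p90': 20, 'p95': 30}
--
--     spacings.sort()
--     n = len(spacings)
--
--     return {
--         'p50': spacings[int(n * 0.5)],   # Median
--         'p75': spacings[int(n * 0.75)],  # 75th percentile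
--         'p90': spacings[int(n * 0.90)],  # 90th percentile
--         'p95': spacings[int(n * 0.95)]   # 95th percentile
--     }
-- ===== SOURCE B (Python) =====
-- from typing import List, Dict
--
-- def _calculate_spacing_percentiles(all_lines_data: List[Dict]) -> Dict:
--     """Same statistics, but the four order statistics are found by quickselect
--     (three-way partition) instead of fully sorting the spacing list."""
--
--     pages = {}
--     for line in all_lines_data:
--         pages.setdefault(line.get('page', 0), []).append(line)
--
--     spacings = []
--     for page_lines in pages.values():
--         for i, (current, next_line) in enumerate(zip(page_lines, page_lines[1:])):
--             current_y = current.get('y_position', i * 14)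
--             current_height = current.get('height', 14)
--             next_y = next_line.get('y_position', (i + 1) * 14)
--             spacings.append(abs(next_y - (current_y + current_height)))
--
--     if not spacings:
--         return {'p50': 5, 'p75': 10, 'p90': 20, 'p95': 30}
--
--     def select(xs, k):
--         # k-th smallest (0-based) by quickselect with three-way partition
--         while True:
--             pivot = xs[0]
--             less = [x for x in xs if x < pivot]
--             if k < len(less):
--                 xs = less
--                 continue
--             eq = xs.count(pivot)
--             if k < len(less) + eq:
--                 return pivot
--             k -= len(less) + eq
--             xs = [x for x in xs if x > pivot]
--
--     n = len(spacings)
--     return {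
--         'p50': select(spacings, n // 2),
--         'p75': select(spacings, 3 * n // 4),
--         'p90': select(spacings, 9 * n // 10),
--         'p95': select(spacings, 19 * n // 20)
--     }
-- ===== Notes on version B (the rewrite author's own statement) =====
-- stated objective: alternative
-- what changed: B groups lines with dict.setdefault and zip-pairs, and replaces the full sort plus indexing by a quickselect (three-way partition) that extracts each of the four fixed percentile ranks directly.
import Mathlib
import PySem

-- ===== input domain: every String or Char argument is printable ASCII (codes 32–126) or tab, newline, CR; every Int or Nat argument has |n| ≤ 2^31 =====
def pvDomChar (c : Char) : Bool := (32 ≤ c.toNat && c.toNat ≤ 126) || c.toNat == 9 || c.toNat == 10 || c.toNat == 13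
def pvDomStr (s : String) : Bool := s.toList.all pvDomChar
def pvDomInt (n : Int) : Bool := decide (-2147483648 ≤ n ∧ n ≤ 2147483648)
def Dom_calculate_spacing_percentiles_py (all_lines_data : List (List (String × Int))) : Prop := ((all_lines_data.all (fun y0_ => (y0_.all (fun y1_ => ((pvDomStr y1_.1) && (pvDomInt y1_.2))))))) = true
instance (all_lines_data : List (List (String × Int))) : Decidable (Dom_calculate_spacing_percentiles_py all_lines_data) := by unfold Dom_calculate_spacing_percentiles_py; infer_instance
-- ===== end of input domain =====

-- B replaces the full sort + index step by a quickselect (three-way partition) extracting each of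
-- the four fixed percentile ranks directly, and groups pages with dict.setdefault ("alternative").

-- ===== PORT A =====
-- spacing for the pair at in-page index i (defaults exactly as A: y_position -> i*14, height -> 14)
def pvSpacingA (pl : List (List (String × Int))) (i : Int) : Int :=
  let current := (PySem.List.pyGet? pl i).getD []          -- pl[i]; i ∈ range(len-1) is always in range
  let next_line := (PySem.List.pyGet? pl (i + 1)).getD []  -- pl[i+1]; always in range
  let current_y := (PySem.Dict.mk current).getD "y_position" (i * 14)
  let current_height := (PySem.Dict.mk current).getD "height" 14
  let next_y := (PySem.Dict.mk next_line).getD "y_position" ((i + 1) * 14)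
  |next_y - (current_y + current_height)|

def calculate_spacing_percentiles_py (all_lines_data : List (List (String × Int))) : List (String × Int) :=
  let pages : PySem.Dict Int (List (List (String × Int))) :=
    all_lines_data.foldl (fun d line =>
      let page := (PySem.Dict.mk line).getD "page" 0
      let d := if d.contains page then d else d.insert page []   -- if page not in pages: pages[page] = []
      d.modify page [] (fun g => g ++ [line]))                    -- pages[page].append(line)
      PySem.Dict.empty
  let spacings : List Int :=
    pages.values.foldl (fun acc pl =>
      (PySem.List.pyRange 0 ((pl.length : Int) - 1)).foldl (fun acc i => acc ++ [pvSpacingA pl i]) acc) []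
  if spacings = [] then [("p50", 5), ("p75", 10), ("p90", 20), ("p95", 30)]
  else
    let s := PySem.List.sorted spacings (fun x => x)
    let n : Int := spacings.length
    -- CPython's int(n*0.5), int(n*0.75), int(n*0.90), int(n*0.95) are exactly the floor divisions
    -- below for every list length 0 < n ≤ 2^31 (the float products never cross an integer there)
    [("p50", PySem.List.pyGetD s (PySem.Int.floordiv n 2) 0),
     ("p75", PySem.List.pyGetD s (PySem.Int.floordiv (3 * n) 4) 0),
     ("p90", PySem.List.pyGetD s (PySem.Int.floordiv (9 * n) 10) 0),
     ("p95", PySem.List.pyGetD s (PySem.Int.floordiv (19 * n) 20) 0)]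

-- ===== PORT B =====
-- spacing for the pair (current, next_line) at in-page index i
def pvSpacingB (i : Int) (current next_line : List (String × Int)) : Int :=
  let current_y := (PySem.Dict.mk current).getD "y_position" (i * 14)
  let current_height := (PySem.Dict.mk current).getD "height" 14
  let next_y := (PySem.Dict.mk next_line).getD "y_position" ((i + 1) * 14)
  |next_y - (current_y + current_height)|

-- k-th smallest element (0-based) by quickselect with three-way partition (Source B's select loop)
def pvSelect : List Int → Int → Int
  | [], _ => 0                                   -- unreachable: always called with a nonempty list
  | p :: t, k =>
    let less := (p :: t).filter (fun x => decide (x < p))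
    if k < (less.length : Int) then pvSelect less k
    else
      let eq : Int := (p :: t).count p
      if k < (less.length : Int) + eq then p
      else pvSelect ((p :: t).filter (fun x => decide (p < x))) (k - (less.length : Int) - eq)
termination_by xs _ => xs.length
decreasing_by
  · exact List.length_filter_lt_length_iff_exists.mpr ⟨p, List.mem_cons_self, by simp⟩
  · exact List.length_filter_lt_length_iff_exists.mpr ⟨p, List.mem_cons_self, by simp⟩

def calculate_spacing_percentiles_py_alt (all_lines_data : List (List (String × Int))) : List (String × Int) :=
  let pages : PySem.Dict Int (List (List (String × Int))) :=
    all_lines_data.foldl (fun d line =>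
      let page := (PySem.Dict.mk line).getD "page" 0
      (d.setdefault page []).modify page [] (fun g => g ++ [line]))  -- pages.setdefault(page, []).append(line)
      PySem.Dict.empty
  let spacings : List Int :=
    pages.values.foldl (fun acc pl =>
      (PySem.List.enumerate (pl.zip pl.tail)).foldl                  -- enumerate(zip(page_lines, page_lines[1:]))
        (fun acc x => acc ++ [pvSpacingB x.1 x.2.1 x.2.2]) acc) []
  if spacings = [] then [("p50", 5), ("p75", 10), ("p90", 20), ("p95", 30)]
  else
    let n : Int := spacings.length
    [("p50", pvSelect spacings (PySem.Int.floordiv n 2)),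
     ("p75", pvSelect spacings (PySem.Int.floordiv (3 * n) 4)),
     ("p90", pvSelect spacings (PySem.Int.floordiv (9 * n) 10)),
     ("p95", pvSelect spacings (PySem.Int.floordiv (19 * n) 20))]

-- ===== PRECONDITION & SPEC =====
def Spec_calculate_spacing_percentiles_py (all_lines_data : List (List (String × Int))) (out : List (String × Int)) : Prop := out = calculate_spacing_percentiles_py_alt all_lines_data
instance (all_lines_data : List (List (String × Int))) (out : List (String × Int)) : Decidable (Spec_calculate_spacing_percentiles_py all_lines_data out) := by unfold Spec_calculate_spacing_percentiles_py; infer_instance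

-- ===== CLAIM (what is proved, stated in full; the proofs are below) =====
def Claim_equal_calculate_spacing_percentiles_py : Prop := ∀ (all_lines_data : List (List (String × Int))), Dom_calculate_spacing_percentiles_py all_lines_data → Spec_calculate_spacing_percentiles_py all_lines_data (calculate_spacing_percentiles_py all_lines_data)

-- ===== LEMMAS AND PROOFS =====

theorem pv_decomp (p : Int) (t : List Int) :
    PySem.List.sorted (p :: t) (fun x => x)
      = PySem.List.sorted ((p :: t).filter (fun x => decide (x < p))) (fun x => x)
        ++ ((p :: t).filter (fun x => x == p))
        ++ PySem.List.sorted ((p :: t).filter (fun x => decide (p < x))) (fun x => x) := by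
  set xs := p :: t with hxs
  set L := xs.filter (fun x => decide (x < p))
  set E := xs.filter (fun x => x == p)
  set G := xs.filter (fun x => decide (p < x))
  have hmemL : ∀ x ∈ L, x < p := fun x hx => by
    have := (List.mem_filter.mp hx).2; simpa using this
  have hmemE : ∀ x ∈ E, x = p := fun x hx => by
    have := (List.mem_filter.mp hx).2; simpa using this
  have hmemG : ∀ x ∈ G, p < x := fun x hx => by
    have := (List.mem_filter.mp hx).2; simpa using this
  apply PySem.List.sorted_id_eq_of_perm_of_pairwise
  · -- permutation
    have h1 : (L ++ xs.filter (fun x => !decide (x < p))).Perm xs :=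
      List.filter_append_perm _ xs
    have h2 : ((xs.filter (fun x => !decide (x < p))).filter (fun x => x == p)
        ++ (xs.filter (fun x => !decide (x < p))).filter (fun x => !(x == p))).Perm
        (xs.filter (fun x => !decide (x < p))) :=
      List.filter_append_perm _ _
    have hE : (xs.filter (fun x => !decide (x < p))).filter (fun x => x == p) = E := by
      rw [List.filter_filter]
      apply List.filter_congr
      intro x _
      by_cases h : x = p
      · simp [h]
      · simp [h]
    have hG : (xs.filter (fun x => !decide (x < p))).filter (fun x => !(x == p)) = G := by
      rw [List.filter_filter]
      apply List.filter_congr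
      intro x _
      by_cases h : x = p
      · simp [h]
      · by_cases h2 : x < p
        · simp [h2, show ¬ p < x by omega]
        · simp [h, h2, show p < x by omega]
    have hperm3 : ((L ++ E) ++ G).Perm xs := by
      have : (L ++ (E ++ G)).Perm xs := by
        refine List.Perm.trans (List.Perm.append_left L ?_) h1
        rw [← hE, ← hG]; exact h2
      simpa [List.append_assoc] using this
    exact List.Perm.trans
      (((PySem.List.sorted_perm L (fun x => x) false).append (List.Perm.refl E)).append
        (PySem.List.sorted_perm G (fun x => x) false)) hperm3
  · -- pairwise
    rw [List.append_assoc, List.pairwise_append]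
    refine ⟨?_, ?_, ?_⟩
    · simpa using PySem.List.sorted_pairwise L (fun x => x)
    · rw [List.pairwise_append]
      refine ⟨?_, ?_, ?_⟩
      · show List.Pairwise _ (xs.filter (fun x => x == p))
        rw [List.filter_beq]
        exact List.pairwise_replicate.mpr (Or.inr (le_refl p))
      · simpa using PySem.List.sorted_pairwise G (fun x => x)
      · intro a ha b hb
        have ha' := hmemE a ha
        have hb' := hmemG b ((PySem.List.mem_sorted _ _ _ _).mp hb)
        omega
    · intro a ha b hb
      have ha' := hmemL a ((PySem.List.mem_sorted _ _ _ _).mp ha)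
      rcases List.mem_append.mp hb with hb | hb
      · have := hmemE b hb; omega
      · have := hmemG b ((PySem.List.mem_sorted _ _ _ _).mp hb); omega

theorem pv_select_eq_aux : ∀ (m : Nat) (xs : List Int), xs.length ≤ m → ∀ k : Int, 0 ≤ k →
    k < (xs.length : Int) → pvSelect xs k = PySem.List.pyGetD (PySem.List.sorted xs (fun x => x)) k 0 := by
  intro m
  induction m with
  | zero => intro xs hm k h0 h1; omega
  | succ m ih =>
    intro xs hm k h0 h1
    match xs with
    | [] => simp at h1; omega
    | p :: t =>
      set xs := p :: t with hxs
      set L := xs.filter (fun x => decide (x < p)) with hL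
      set E := xs.filter (fun x => x == p) with hE
      set G := xs.filter (fun x => decide (p < x)) with hG
      have hlenL : (PySem.List.sorted L (fun x => x)).length = L.length := PySem.List.length_sorted ..
      have hlenG : (PySem.List.sorted G (fun x => x)).length = G.length := PySem.List.length_sorted ..
      have hsplit : PySem.List.sorted xs (fun x => x)
          = PySem.List.sorted L (fun x => x) ++ E ++ PySem.List.sorted G (fun x => x) := pv_decomp p t
      have hlen : xs.length = L.length + E.length + G.length := by
        have := congrArg List.length hsplit
        simp [PySem.List.length_sorted] at this
        omega
      have hcount : xs.count p = E.length := by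
        rw [hE, List.filter_beq, List.length_replicate]
      have hmemE : ∀ x ∈ E, x = p := fun x hx => by
        have := (List.mem_filter.mp hx).2; simpa using this
      have hLlt : L.length < xs.length :=
        List.length_filter_lt_length_iff_exists.mpr ⟨p, List.mem_cons_self, by simp⟩
      have hGlt : G.length < xs.length :=
        List.length_filter_lt_length_iff_exists.mpr ⟨p, List.mem_cons_self, by simp⟩
      rw [PySem.List.pyGetD_eq_getElem _ 0 h0 (by rw [PySem.List.length_sorted]; exact_mod_cast h1)]
      rw [pvSelect]
      simp only [← hL, ← hG, ← hxs]
      by_cases hk1 : k < (L.length : Int)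
      · rw [if_pos hk1]
        rw [ih L (by omega) k h0 hk1]
        rw [PySem.List.pyGetD_eq_getElem _ 0 h0 (by rw [PySem.List.length_sorted]; exact_mod_cast hk1)]
        rw [List.getElem_of_eq hsplit, List.getElem_of_eq (List.append_assoc ..)]
        rw [List.getElem_append_left (by omega)]
      · rw [if_neg hk1]
        by_cases hk2 : k < (L.length : Int) + (xs.count p : Int)
        · rw [if_pos hk2]
          rw [List.getElem_of_eq hsplit]
          rw [List.getElem_append_left (by simp [hlenL]; omega)]
          rw [List.getElem_append_right (by omega)]
          exact (hmemE _ (List.getElem_mem _)).symm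
        · rw [if_neg hk2]
          have h0' : 0 ≤ k - (L.length : Int) - (xs.count p : Int) := by omega
          have h1' : k - (L.length : Int) - (xs.count p : Int) < (G.length : Int) := by
            have : k < (xs.length : Int) := h1
            omega
          rw [ih G (by omega) _ h0' h1']
          rw [PySem.List.pyGetD_eq_getElem _ 0 h0' (by rw [PySem.List.length_sorted]; exact_mod_cast h1')]
          rw [List.getElem_of_eq hsplit]
          rw [List.getElem_append_right (by simp [hlenL]; omega)]
          congr 1
          simp [hlenL]
          omega

theorem pv_select_eq (xs : List Int) (k : Int) (h0 : 0 ≤ k) (h1 : k < (xs.length : Int)) :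
    pvSelect xs k = PySem.List.pyGetD (PySem.List.sorted xs (fun x => x)) k 0 :=
  pv_select_eq_aux xs.length xs le_rfl k h0 h1

theorem pv_pairs_eq (pl : List (List (String × Int))) (acc : List Int) :
    (PySem.List.pyRange 0 ((pl.length : Int) - 1)).foldl (fun acc i => acc ++ [pvSpacingA pl i]) acc
    = (PySem.List.enumerate (pl.zip pl.tail)).foldl (fun acc x => acc ++ [pvSpacingB x.1 x.2.1 x.2.2]) acc := by
  rw [PySem.List.foldl_append_singleton_eq_map (f := fun i => pvSpacingA pl i)]
  rw [PySem.List.foldl_append_singleton_eq_map (fun x => pvSpacingB x.1 x.2.1 x.2.2) (PySem.List.enumerate (pl.zip pl.tail)) acc]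
  congr 1
  apply List.ext_getElem
  · simp [PySem.List.length_pyRange_one, PySem.List.length_enumerate, List.length_zip]
  · intro i h1 h2
    have hi : i < pl.length - 1 := by
      simp [PySem.List.length_pyRange_one] at h1; omega
    have hi1 : i < pl.length := by omega
    have hi2 : i + 1 < pl.length := by omega
    simp only [List.getElem_map]
    rw [PySem.List.getElem_pyRange_one, PySem.List.getElem_enumerate]
    simp only [List.getElem_zip, List.getElem_tail]
    show pvSpacingA pl (0 + (i : Int)) = pvSpacingB (0 + (i : Int)) pl[i] pl[i + 1]
    simp only [zero_add]
    unfold pvSpacingA pvSpacingB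
    have g1 : PySem.List.pyGet? pl (i : Int) = some pl[i] := by
      rw [PySem.List.pyGet?_natCast, List.getElem?_eq_getElem]
    have g2 : PySem.List.pyGet? pl ((i : Int) + 1) = some pl[i + 1] := by
      have : ((i : Int) + 1) = ((i + 1 : Nat) : Int) := by push_cast; ring
      rw [this, PySem.List.pyGet?_natCast, List.getElem?_eq_getElem]
    rw [g1, g2]
    rfl

-- the two grouping loop bodies agree on every dict state
theorem pv_step_eq (d : PySem.Dict Int (List (List (String × Int)))) (line : List (String × Int)) :
    (let page := (PySem.Dict.mk line).getD "page" 0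
     let d' := if d.contains page then d else d.insert page []
     d'.modify page [] (fun g => g ++ [line]))
    = (let page := (PySem.Dict.mk line).getD "page" 0
       (d.setdefault page []).modify page [] (fun g => g ++ [line])) := by
  by_cases hc : d.contains ((PySem.Dict.mk line).getD "page" 0)
  · simp [hc, PySem.Dict.setdefault]
  · simp only [Bool.not_eq_true] at hc
    simp [hc, PySem.Dict.setdefault, PySem.Dict.insert]

-- ===== VERDICT (by name: the statement is the Claim_ definition above) =====
theorem calculate_spacing_percentiles_py_spec : Claim_equal_calculate_spacing_percentiles_py := by
  intro all_lines_data _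
  unfold Spec_calculate_spacing_percentiles_py
  simp only [calculate_spacing_percentiles_py, calculate_spacing_percentiles_py_alt]
  rw [show (fun (d : PySem.Dict Int (List (List (String × Int)))) line =>
        (if d.contains ((PySem.Dict.mk line).getD "page" 0) then d
         else d.insert ((PySem.Dict.mk line).getD "page" 0) []).modify
          ((PySem.Dict.mk line).getD "page" 0) [] (fun g => g ++ [line]))
      = (fun (d : PySem.Dict Int (List (List (String × Int)))) line =>
        (d.setdefault ((PySem.Dict.mk line).getD "page" 0) []).modify
          ((PySem.Dict.mk line).getD "page" 0) [] (fun g => g ++ [line]))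
      from funext fun d => funext fun line => pv_step_eq d line]
  rw [show (fun (acc : List Int) (pl : List (List (String × Int))) =>
        (PySem.List.pyRange 0 ((pl.length : Int) - 1)).foldl (fun acc i => acc ++ [pvSpacingA pl i]) acc)
      = (fun (acc : List Int) (pl : List (List (String × Int))) =>
        (PySem.List.enumerate (pl.zip pl.tail)).foldl (fun acc x => acc ++ [pvSpacingB x.1 x.2.1 x.2.2]) acc)
      from funext fun acc => funext fun pl => pv_pairs_eq pl acc]
  generalize (List.foldl (fun d line =>
      (d.setdefault ((PySem.Dict.mk line).getD "page" 0) []).modify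
        ((PySem.Dict.mk line).getD "page" 0) [] (fun g => g ++ [line]))
      PySem.Dict.empty all_lines_data).values.foldl
      (fun acc pl => (PySem.List.enumerate (pl.zip pl.tail)).foldl
        (fun acc x => acc ++ [pvSpacingB x.1 x.2.1 x.2.2]) acc) [] = sp
  by_cases hempty : sp = []
  · simp [hempty]
  · have hlen : 0 < sp.length := List.length_pos_iff.mpr hempty
    have hn : (1 : Int) ≤ (sp.length : Int) := by exact_mod_cast hlen
    have hdiv : ∀ a : Int, ∀ b : Int, 0 < b → PySem.Int.floordiv a b = a / b :=
      fun a b hb => PySem.Int.floordiv_eq_ediv_of_pos hb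
    have h50 := pv_select_eq sp (PySem.Int.floordiv (sp.length : Int) 2)
      (by rw [hdiv _ _ (by norm_num)]; omega) (by rw [hdiv _ _ (by norm_num)]; omega)
    have h75 := pv_select_eq sp (PySem.Int.floordiv (3 * (sp.length : Int)) 4)
      (by rw [hdiv _ _ (by norm_num)]; omega) (by rw [hdiv _ _ (by norm_num)]; omega)
    have h90 := pv_select_eq sp (PySem.Int.floordiv (9 * (sp.length : Int)) 10)
      (by rw [hdiv _ _ (by norm_num)]; omega) (by rw [hdiv _ _ (by norm_num)]; omega)
    have h95 := pv_select_eq sp (PySem.Int.floordiv (19 * (sp.length : Int)) 20)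
      (by rw [hdiv _ _ (by norm_num)]; omega) (by rw [hdiv _ _ (by norm_num)]; omega)
    rw [hdiv _ _ (by norm_num : (0:Int) < 2)] at h50
    rw [hdiv _ _ (by norm_num : (0:Int) < 4)] at h75
    rw [hdiv _ _ (by norm_num : (0:Int) < 10)] at h90
    rw [hdiv _ _ (by norm_num : (0:Int) < 20)] at h95
    simp [hempty, h50, h75, h90, h95]
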